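-- pv_equiv track=rewrite | github.com/Gwonwoo-Nam/Algorithm-BaekJoon | #1107 리모컨/리모컨.py | changeNumber
-- ===== SOURCE A (Python) =====
-- def changeNumber(n, brokens) :
--     up = n
--     down = n
--     while True :
--         upch = set(list(str(up)))
--         downch = set(list(str(down)))
--         upFlag = False
--         downFlag = False
--         if down >= 0 and "+" not in brokens :
--             for button in downch :
--                 if button in brokens :
--                     down -= 1
--                     downFlag = True
--                     break
--             if not downFlag :
--                 return down
--         if "-" not in brokens :
--             for button in upch :
--                 if button in brokens :
--                     up += 1
--                     upFlag = True
--                     break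
--             if not upFlag :
--                 return up
-- ===== SOURCE B (Python) =====
-- def changeNumber(n, brokens):
--     # Greedy digit construction of the nearest valid numbers below/above n,
--     # instead of A's step-by-step outward walk.
--     allowed = [d for d in range(10) if str(d) not in brokens]
--     pos = [d for d in allowed if d > 0]
--     zero_ok = 0 in allowed
--
--     def ok_pos(m):
--         # m >= 1: every decimal digit of m allowed?
--         while m > 9:
--             if m % 10 not in allowed:
--                 return False
--             m //= 10
--         return m in allowed
--
--     def floor_pos(m):
--         # largest positive integer <= m all of whose digits are allowed, or None
--         if not pos or m < pos[0]:
--             return None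
--         if m <= 9:
--             return max(d for d in pos if d <= m)
--         q, r = divmod(m, 10)
--         if ok_pos(q):
--             lo = max((d for d in allowed if d <= r), default=None)
--             if lo is not None:
--                 return 10 * q + lo
--         f = floor_pos(q - 1)
--         if f is not None:
--             return 10 * f + allowed[-1]
--         return pos[-1]
--
--     def ceil_pos(m):
--         # smallest positive integer >= m all of whose digits are allowed
--         # (pos must be non-empty)
--         if m <= pos[0]:
--             return pos[0]
--         if m <= 9:
--             hi = min((d for d in pos if d >= m), default=None)
--             if hi is not None:
--                 return hi
--             return 10 * pos[0] + allowed[0]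
--         q, r = divmod(m, 10)
--         if ok_pos(q):
--             hi = min((d for d in allowed if d >= r), default=None)
--             if hi is not None:
--                 return 10 * q + hi
--         return 10 * ceil_pos(q + 1) + allowed[0]
--
--     down = None
--     if "+" not in brokens and n >= 0:
--         down = floor_pos(n)
--         if down is None and zero_ok:
--             down = 0
--
--     up = None
--     if "-" not in brokens:
--         if n <= 0:
--             f = floor_pos(-n)
--             if f is not None:
--                 up = -f
--             elif zero_ok:
--                 up = 0
--             elif pos:
--                 up = ceil_pos(1)
--         elif pos:
--             up = ceil_pos(n)
--
--     if down is not None and (up is None or n - down <= up - n):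
--         return down
--     if up is not None:
--         return up
-- ===== Notes on version B (the rewrite author's own statement) =====
-- stated objective: alternative
-- what changed: Replaces A's simultaneous one-step-down/one-step-up walk (re-checking every intermediate number's digits) by a greedy digit construction of the largest all-allowed-digit number below n and the smallest one above n, combined with the same down-first tie-break.
import Mathlib
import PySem

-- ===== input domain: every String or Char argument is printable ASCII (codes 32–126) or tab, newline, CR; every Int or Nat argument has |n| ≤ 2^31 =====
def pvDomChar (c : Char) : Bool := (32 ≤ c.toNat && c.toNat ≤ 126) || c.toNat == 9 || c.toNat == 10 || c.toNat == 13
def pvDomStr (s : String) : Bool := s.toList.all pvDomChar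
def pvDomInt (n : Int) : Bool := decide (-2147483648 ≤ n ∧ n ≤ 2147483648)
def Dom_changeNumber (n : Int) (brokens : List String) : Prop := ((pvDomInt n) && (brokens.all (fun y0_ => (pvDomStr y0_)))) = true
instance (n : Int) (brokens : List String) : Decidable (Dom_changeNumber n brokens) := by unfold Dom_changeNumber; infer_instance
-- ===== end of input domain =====

-- B replaces A's step-by-step outward walk by a greedy digit construction of the
-- nearest valid numbers below/above n (objective: alternative algorithm).
-- A diverges (while True never returns) outside Pre_; there B's value is unconstrained.

-- ===== PORT A =====

-- `set(list(str(x)))` then `for button in ...: if button in brokens` with break: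
-- the flag is order-independent, ported as `any` over the set's element list.
def pvBadChars (brokens : List String) (x : Int) : Bool :=
  (PySem.Set.ofList (PySem.Int.toChars x)).any (fun c => brokens.contains (String.ofList [c]))

-- the `while True` loop of A, with fuel (Python returns ⇔ some; A diverges ⇔ none for every fuel)
def pvLoopA (brokens : List String) : Nat → Int → Int → Option Int
  | 0, _, _ => none
  | (fuel+1), up, down =>
    let dGo : Bool := decide (0 ≤ down) && !(brokens.contains "+")
    if dGo && !(pvBadChars brokens down) then some down
    else
      let down' := if dGo && pvBadChars brokens down then down - 1 else down
      if !(brokens.contains "-") then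
        if !(pvBadChars brokens up) then some up
        else pvLoopA brokens fuel (up + 1) down'
      else pvLoopA brokens fuel up down'

def changeNumber (n : Int) (brokens : List String) : Int :=
  (pvLoopA brokens 100000000000000 n n).getD 0

-- ===== PORT B =====

-- allowed = [d for d in range(10) if str(d) not in brokens]
def pvAllowed (brokens : List String) : List Int :=
  (PySem.List.pyRange 0 10 1).filter (fun d => !(brokens.contains (PySem.Int.toStr d)))

-- ok_pos: the `while m > 9` digit-check loop
def pvOkPos (allowed : List Int) (m : Int) : Bool :=
  if 9 < m then
    if allowed.contains (PySem.Int.mod m 10) then pvOkPos allowed (PySem.Int.floordiv m 10)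
    else false
  else allowed.contains m
termination_by m.toNat
decreasing_by
  simp only [PySem.Int.floordiv_eq_ediv_of_pos (by omega : (0:Int) < 10)]
  omega

-- floor_pos: largest positive integer ≤ m with all digits allowed (pos = positive allowed digits)
def pvFloorPos (allowed pos : List Int) (m : Int) : Option Int :=
  if pos.isEmpty || decide (m < pos.headD 0) then none
  else if 9 < m then
    let q := PySem.Int.floordiv m 10
    let r := PySem.Int.mod m 10
    let tail : Option Int :=
      match pvFloorPos allowed pos (q - 1) with
      | some f => some (10 * f + PySem.List.pyGetD allowed (-1) 0)   -- allowed[-1] (allowed ≠ [] here)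
      | none => some (PySem.List.pyGetD pos (-1) 0)                  -- pos[-1]
    if pvOkPos allowed q then
      match PySem.List.max? (allowed.filter (fun d => d ≤ r)) (fun d => d) with
      | some lo => some (10 * q + lo)
      | none => tail
    else tail
  else PySem.List.max? (pos.filter (fun d => d ≤ m)) (fun d => d)    -- non-None: pos[0] ≤ m
termination_by m.toNat
decreasing_by
  simp only [PySem.Int.floordiv_eq_ediv_of_pos (by omega : (0:Int) < 10)]
  omega

-- ceil_pos: smallest positive integer ≥ m with all digits allowed (pos ≠ [] at every Source B call site)
def pvCeilPos (allowed pos : List Int) (m : Int) : Option Int :=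
  if pos.isEmpty then none
  else if m ≤ pos.headD 0 then some (pos.headD 0)
  else if 9 < m then
    let q := PySem.Int.floordiv m 10
    let r := PySem.Int.mod m 10
    let tail : Option Int :=
      match pvCeilPos allowed pos (q + 1) with
      | some c => some (10 * c + PySem.List.pyGetD allowed 0 0)      -- allowed[0]
      | none => none
    if pvOkPos allowed q then
      match PySem.List.min? (allowed.filter (fun d => r ≤ d)) (fun d => d) with
      | some hi => some (10 * q + hi)
      | none => tail
    else tail
  else
    match PySem.List.min? (pos.filter (fun d => m ≤ d)) (fun d => d) with
    | some hi => some hi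
    | none => some (10 * pos.headD 0 + PySem.List.pyGetD allowed 0 0)
termination_by m.toNat
decreasing_by
  simp only [PySem.Int.floordiv_eq_ediv_of_pos (by omega : (0:Int) < 10)]
  omega

-- down = floor_pos(n), or 0 when allowed; only with "+" working and n ≥ 0
def pvDownCand (brokens : List String) (n : Int) : Option Int :=
  let allowed := pvAllowed brokens
  let pos := allowed.filter (fun d => 0 < d)
  if !(brokens.contains "+") && decide (0 ≤ n) then
    match pvFloorPos allowed pos n with
    | some f => some f
    | none => if allowed.contains 0 then some 0 else none
  else none

-- up candidate; only with "-" working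
def pvUpCand (brokens : List String) (n : Int) : Option Int :=
  let allowed := pvAllowed brokens
  let pos := allowed.filter (fun d => 0 < d)
  if !(brokens.contains "-") then
    if n ≤ 0 then
      match pvFloorPos allowed pos (-n) with
      | some f => some (-f)
      | none =>
        if allowed.contains 0 then some 0
        else if !pos.isEmpty then pvCeilPos allowed pos 1
        else none
    else if !pos.isEmpty then pvCeilPos allowed pos n
    else none
  else none

def changeNumber_alt (n : Int) (brokens : List String) : Int :=
  match pvDownCand brokens n, pvUpCand brokens n with
  | some d, some u => if n - d ≤ u - n then d else u
  | some d, none => d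
  | none, some u => u
  | none, none => 0   -- unreachable under Pre_ (Source B falls off the end; A diverges there)

-- ===== PRECONDITION & SPEC =====

-- Pre_ excludes exactly the inputs on which A's `while True` loop never returns
-- (no reachable number in the enabled directions); it is the closed-form
-- termination condition of A, so no input on which A returns is excluded.
def Pre_changeNumber (n : Int) (brokens : List String) : Prop :=
  (¬ "+" ∈ brokens ∧ 0 ≤ n ∧
      ∃ d ∈ PySem.List.pyRange 0 10 1, ¬ PySem.Int.toStr d ∈ brokens ∧ d ≤ n)
  ∨ (¬ "-" ∈ brokens ∧
      ((∃ d ∈ PySem.List.pyRange 1 10 1, ¬ PySem.Int.toStr d ∈ brokens)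
        ∨ (¬ PySem.Int.toStr 0 ∈ brokens ∧ n ≤ 0)))
instance (n : Int) (brokens : List String) : Decidable (Pre_changeNumber n brokens) := by
  unfold Pre_changeNumber; infer_instance

def pvWitness_changeNumber : Int × List String := (100, ["7"])

def Spec_changeNumber (n : Int) (brokens : List String) (out : Int) : Prop := out = changeNumber_alt n brokens
instance (n : Int) (brokens : List String) (out : Int) : Decidable (Spec_changeNumber n brokens out) := by unfold Spec_changeNumber; infer_instance

-- ===== CLAIM (what is proved, stated in full; the proofs are below) =====
def Claim_equal_changeNumber : Prop := ∀ (n : Int) (brokens : List String), Dom_changeNumber n brokens → Pre_changeNumber n brokens → Spec_changeNumber n brokens (changeNumber n brokens)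

-- ===== LEMMAS AND PROOFS =====

-- ---------- digit-string bridge ----------

-- the digit characters of m, most significant first
def pvDigs (m : Nat) : List Char :=
  if h : m < 10 then [Nat.digitChar m] else pvDigs (m / 10) ++ [Nat.digitChar (m % 10)]
termination_by m
decreasing_by omega

lemma pvDigs_small {m : Nat} (h : m < 10) : pvDigs m = [Nat.digitChar m] := by
  rw [pvDigs]; simp [h]

lemma pvDigs_step {m : Nat} (h : 10 ≤ m) :
    pvDigs m = pvDigs (m / 10) ++ [Nat.digitChar (m % 10)] := by
  rw [pvDigs]; simp [Nat.not_lt_of_ge h]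

lemma pvToDigitsCore_eq : ∀ (fuel m : Nat) (ds : List Char), 0 < fuel → m < 10 ^ fuel →
    Nat.toDigitsCore 10 fuel m ds = pvDigs m ++ ds := by
  intro fuel
  induction fuel with
  | zero => intro m ds h _; omega
  | succ f ih =>
    intro m ds _ hm
    show Nat.toDigitsCore 10 (f+1) m ds = _
    simp only [Nat.toDigitsCore]
    by_cases h0 : m / 10 = 0
    · have hm10 : m < 10 := by omega
      simp only [h0, if_pos]
      rw [pvDigs_small hm10, Nat.mod_eq_of_lt hm10]
      rfl
    · have h10 : 10 ≤ m := by
        rcases Nat.lt_or_ge m 10 with h | h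
        · exact absurd (Nat.div_eq_of_lt h) h0
        · exact h
      have hf : 0 < f := by
        rcases Nat.eq_zero_or_pos f with rfl | h
        · simp at hm; omega
        · exact h
      have hdiv : m / 10 < 10 ^ f := by
        rw [Nat.div_lt_iff_lt_mul (by norm_num)]
        calc m < 10 ^ (f + 1) := hm
        _ = 10 ^ f * 10 := by ring
      simp only [h0, if_neg]
      rw [ih (m / 10) _ hf hdiv, pvDigs_step h10]
      simp

lemma pvToDigits_eq (m : Nat) : Nat.toDigits 10 m = pvDigs m := by
  have h1 : m < 10 ^ (m + 1) := by
    calc m < 10 ^ m := Nat.lt_pow_self (by norm_num)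
    _ ≤ 10 ^ (m + 1) := Nat.pow_le_pow_right (by norm_num) (by omega)
  have := pvToDigitsCore_eq (m + 1) m [] (by omega) h1
  simpa [Nat.toDigits] using this

lemma pvToChars_nonneg {x : Int} (hx : 0 ≤ x) : PySem.Int.toChars x = pvDigs x.toNat := by
  rw [PySem.Int.toChars, if_neg (by omega), pvToDigits_eq]

lemma pvToChars_neg {x : Int} (hx : x < 0) : PySem.Int.toChars x = '-' :: pvDigs (-x).toNat := by
  rw [PySem.Int.toChars, if_pos hx, pvToDigits_eq]
  have : x.natAbs = (-x).toNat := by omega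
  rw [this]

lemma pvBadChars_eq_any (brokens : List String) (x : Int) :
    pvBadChars brokens x = (PySem.Int.toChars x).any (fun c => brokens.contains (String.ofList [c])) := by
  rw [pvBadChars, Bool.eq_iff_iff]
  simp only [List.any_eq_true]
  constructor
  · rintro ⟨c, hc, h⟩; exact ⟨c, (PySem.Set.mem_ofList _ _).mp hc, h⟩
  · rintro ⟨c, hc, h⟩; exact ⟨c, (PySem.Set.mem_ofList _ _).mpr hc, h⟩

-- for a single digit, A's character test and B's `str(d) not in brokens` test coincide
lemma pvDigitStr_eq (d : Int) (h0 : 0 ≤ d) (h9 : d < 10) :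
    String.ofList [Nat.digitChar d.toNat] = PySem.Int.toStr d := by
  interval_cases d <;> decide

lemma pvMinusStr : String.ofList ['-'] = "-" := by decide

lemma pvMem_allowed {brokens : List String} {d : Int} :
    d ∈ pvAllowed brokens ↔ 0 ≤ d ∧ d < 10 ∧ brokens.contains (PySem.Int.toStr d) = false := by
  rw [pvAllowed]
  simp only [List.mem_filter, PySem.List.mem_pyRange_one, Bool.not_eq_true']
  tauto

lemma pvAllowed_pairwise (brokens : List String) : (pvAllowed brokens).Pairwise (· < ·) := by
  exact (PySem.List.pairwise_lt_pyRange_one 0 10).filter _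

lemma pvContains_iff {α : Type} [BEq α] [LawfulBEq α] {l : List α} {a : α} :
    l.contains a = true ↔ a ∈ l := by simp

lemma pvContains_allowed {brokens : List String} {d : Int} (h0 : 0 ≤ d) (h9 : d < 10) :
    (pvAllowed brokens).contains d = !(brokens.contains (PySem.Int.toStr d)) := by
  rw [Bool.eq_iff_iff]
  simp only [pvContains_iff, pvMem_allowed, Bool.not_eq_true']
  tauto

lemma pvBad_small {brokens : List String} {x : Int} (h0 : 0 ≤ x) (h9 : x ≤ 9) :
    pvBadChars brokens x = brokens.contains (PySem.Int.toStr x) := by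
  rw [pvBadChars_eq_any, pvToChars_nonneg h0, pvDigs_small (by omega : x.toNat < 10)]
  simp [pvDigitStr_eq x h0 (by omega)]

lemma pvBad_step {brokens : List String} {x : Int} (h : 10 ≤ x) :
    pvBadChars brokens x
      = (pvBadChars brokens (x / 10) || brokens.contains (PySem.Int.toStr (x % 10))) := by
  rw [pvBadChars_eq_any, pvToChars_nonneg (by omega), pvDigs_step (by omega : 10 ≤ x.toNat)]
  rw [List.any_append]
  have h1 : (pvDigs (x.toNat / 10)).any (fun c => brokens.contains (String.ofList [c]))
      = pvBadChars brokens (x / 10) := by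
    rw [pvBadChars_eq_any, pvToChars_nonneg (by omega : (0:Int) ≤ x / 10)]
    have : (x / 10).toNat = x.toNat / 10 := by omega
    rw [this]
  have h2 : x.toNat % 10 = (x % 10).toNat := by omega
  rw [h1]
  simp [h2, pvDigitStr_eq (x % 10) (by omega) (by omega)]

-- ---------- pvOkPos basic shape ----------

lemma pvOkPos_small {allowed : List Int} {m : Int} (h : m ≤ 9) :
    pvOkPos allowed m = allowed.contains m := by
  rw [pvOkPos]; simp [Int.not_lt.mpr h]

lemma pvOkPos_decomp {allowed : List Int} {q r : Int} (hq : 1 ≤ q) (h0 : 0 ≤ r) (h9 : r < 10) :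
    pvOkPos allowed (10 * q + r) = (pvOkPos allowed q && allowed.contains r) := by
  rw [pvOkPos]
  have h9' : (9:Int) < 10 * q + r := by omega
  rw [if_pos h9']
  rw [PySem.Int.mod_eq_emod_of_pos (by omega), PySem.Int.floordiv_eq_ediv_of_pos (by omega)]
  have hm : (10 * q + r) % 10 = r := by omega
  have hd : (10 * q + r) / 10 = q := by omega
  rw [hm, hd]
  cases h : allowed.contains r <;> simp [h]

-- the main bridge: A's digit-set test agrees with B's arithmetic digit test, for x ≥ 0
lemma pvBad_iff_not_ok {brokens : List String} : ∀ {x : Int}, 0 ≤ x →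
    pvBadChars brokens x = !pvOkPos (pvAllowed brokens) x := by
  have main : ∀ N : Nat, ∀ x : Int, 0 ≤ x → x < N →
      pvBadChars brokens x = !pvOkPos (pvAllowed brokens) x := by
    intro N
    induction N with
    | zero => intro x hx h; omega
    | succ N ih =>
      intro x hx hlt
      by_cases h9 : x ≤ 9
      · rw [pvBad_small hx h9, pvOkPos_small h9, pvContains_allowed hx (by omega),
          Bool.not_not]
      · have h10 : 10 ≤ x := by omega
        have hxq : 10 * (x / 10) + x % 10 = x := by omega
        rw [pvBad_step h10]
        conv_rhs => rw [← hxq]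
        rw [pvOkPos_decomp (by omega) (by omega) (by omega)]
        rw [ih (x / 10) (by omega) (by omega)]
        rw [pvContains_allowed (show (0:Int) ≤ x % 10 by omega) (by omega)]
        simp [Bool.not_and, Bool.not_not]
  intro x hx
  exact main (x.toNat + 1) x hx (by omega)

lemma pvBad_neg {brokens : List String} {x : Int} (hx : x < 0)
    (hm : brokens.contains "-" = false) :
    pvBadChars brokens x = pvBadChars brokens (-x) := by
  rw [pvBadChars_eq_any, pvToChars_neg hx]
  rw [List.any_cons]
  have h1 : brokens.contains (String.ofList ['-']) = false := by rw [pvMinusStr]; exact hm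
  rw [h1]
  rw [pvBadChars_eq_any, pvToChars_nonneg (by omega : (0:Int) ≤ -x)]
  simp

-- ---------- extremal properties of floor/ceil ----------

lemma pvPos_mem {brokens : List String} {d : Int} :
    d ∈ (pvAllowed brokens).filter (fun d => 0 < d) ↔
      1 ≤ d ∧ d < 10 ∧ brokens.contains (PySem.Int.toStr d) = false := by
  simp only [List.mem_filter, pvMem_allowed, decide_eq_true_eq]
  constructor
  · rintro ⟨⟨h0, h10, hc⟩, hpos⟩; exact ⟨by omega, h10, hc⟩
  · rintro ⟨h1, h10, hc⟩; exact ⟨⟨by omega, h10, hc⟩, by omega⟩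

-- a Pairwise (<) list: the head is minimal, the last is maximal
lemma pvHead_min {l : List Int} (h : l.Pairwise (· < ·)) (hne : l ≠ []) :
    l.headD 0 ∈ l ∧ ∀ x ∈ l, l.headD 0 ≤ x := by
  match l with
  | [] => exact absurd rfl hne
  | a :: t =>
    rw [List.pairwise_cons] at h
    refine ⟨List.mem_cons_self, ?_⟩
    intro x hx
    rcases List.mem_cons.mp hx with rfl | hx
    · exact le_refl _
    · exact le_of_lt (h.1 x hx)

lemma pvLast_max_aux : ∀ (l : List Int), l.Pairwise (· < ·) → ∀ (hne : l ≠ []) (x : Int), x ∈ l → x ≤ l.getLast hne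
  | [a], _, _, x, hx => by
    simp at hx; simp [hx]
  | a :: b :: t, h, _, x, hx => by
    rw [List.pairwise_cons] at h
    rw [List.getLast_cons (by simp)]
    rcases List.mem_cons.mp hx with rfl | hx
    · exact le_of_lt (h.1 _ (List.getLast_mem (by simp)))
    · exact pvLast_max_aux (b :: t) h.2 (by simp) x hx

lemma pvLast_max {l : List Int} (h : l.Pairwise (· < ·)) (hne : l ≠ []) :
    PySem.List.pyGetD l (-1) 0 ∈ l ∧ ∀ x ∈ l, x ≤ PySem.List.pyGetD l (-1) 0 := by
  have hg : PySem.List.pyGetD l (-1) 0 = l.getLast hne := PySem.List.pyGetD_neg_one l 0 hne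
  rw [hg]
  exact ⟨List.getLast_mem hne, fun x hx => pvLast_max_aux l h hne x hx⟩

-- no positive allowed digit ⇒ no positive valid number at all
lemma pvOk_of_pos_empty {brokens : List String}
    (h : (pvAllowed brokens).filter (fun d => 0 < d) = []) :
    ∀ x : Int, 1 ≤ x → pvOkPos (pvAllowed brokens) x = false := by
  have main : ∀ N : Nat, ∀ x : Int, 1 ≤ x → x < N →
      pvOkPos (pvAllowed brokens) x = false := by
    intro N
    induction N with
    | zero => intro x hx h; omega
    | succ N ih =>
      intro x hx hlt
      by_cases h9 : x ≤ 9
      · rw [pvOkPos_small h9]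
        by_contra hc
        rw [Bool.not_eq_false, pvContains_iff] at hc
        have : x ∈ (pvAllowed brokens).filter (fun d => 0 < d) :=
          List.mem_filter.mpr ⟨hc, by simp; omega⟩
        rw [h] at this
        exact absurd this (List.not_mem_nil)
      · have hxq : 10 * (x / 10) + x % 10 = x := by omega
        conv_lhs => rw [← hxq]
        rw [pvOkPos_decomp (by omega) (by omega) (by omega)]
        rw [ih (x / 10) (by omega) (by omega)]
        simp
  intro x hx
  exact main (x.toNat + 1) x hx (by omega)

-- FLOOR: complete characterisation of pvFloorPos
lemma pvFloorPos_spec (brokens : List String) : ∀ (m : Int),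
    (pvFloorPos (pvAllowed brokens) ((pvAllowed brokens).filter (fun d => 0 < d)) m = none →
      ∀ x, 1 ≤ x → x ≤ m → pvOkPos (pvAllowed brokens) x = false) ∧
    (∀ f, pvFloorPos (pvAllowed brokens) ((pvAllowed brokens).filter (fun d => 0 < d)) m = some f →
      1 ≤ f ∧ f ≤ m ∧ pvOkPos (pvAllowed brokens) f = true ∧
      ∀ x, 1 ≤ x → x ≤ m → pvOkPos (pvAllowed brokens) x = true → x ≤ f) := by
  have hApair : (pvAllowed brokens).Pairwise (· < ·) := pvAllowed_pairwise brokens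
  have hPpair : ((pvAllowed brokens).filter (fun d => 0 < d)).Pairwise (· < ·) := hApair.filter _
  have hmemA : ∀ d ∈ pvAllowed brokens, 0 ≤ d ∧ d < 10 := by
    intro d hd; have := pvMem_allowed.mp hd; exact ⟨this.1, this.2.1⟩
  have hokA : ∀ d ∈ pvAllowed brokens, pvOkPos (pvAllowed brokens) d = true := by
    intro d hd
    rw [pvOkPos_small (by have := hmemA d hd; omega), pvContains_iff]
    exact hd
  have hsingle : ∀ x : Int, 1 ≤ x → x ≤ 9 → pvOkPos (pvAllowed brokens) x = true →
      x ∈ (pvAllowed brokens).filter (fun d => 0 < d) := by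
    intro x h1 h9 hok
    rw [pvOkPos_small h9, pvContains_iff] at hok
    exact List.mem_filter.mpr ⟨hok, by simp; omega⟩
  have main : ∀ N : Nat, ∀ m : Int, m.toNat < N →
    (pvFloorPos (pvAllowed brokens) ((pvAllowed brokens).filter (fun d => 0 < d)) m = none →
      ∀ x, 1 ≤ x → x ≤ m → pvOkPos (pvAllowed brokens) x = false) ∧
    (∀ f, pvFloorPos (pvAllowed brokens) ((pvAllowed brokens).filter (fun d => 0 < d)) m = some f →
      1 ≤ f ∧ f ≤ m ∧ pvOkPos (pvAllowed brokens) f = true ∧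
      ∀ x, 1 ≤ x → x ≤ m → pvOkPos (pvAllowed brokens) x = true → x ≤ f) := by
    intro N
    induction N with
    | zero => intro m hm; omega
    | succ N ih =>
      intro m hm
      by_cases hPe : (pvAllowed brokens).filter (fun d => 0 < d) = []
      · have hnone : pvFloorPos (pvAllowed brokens) ((pvAllowed brokens).filter (fun d => 0 < d)) m = none := by
          rw [pvFloorPos, if_pos (by simp [hPe])]
        refine ⟨fun _ x h1 _ => pvOk_of_pos_empty hPe x h1, fun f hf => by rw [hnone] at hf; cases hf⟩
      · obtain ⟨hp0P, hp0min⟩ := pvHead_min hPpair hPe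
        obtain ⟨hp01, hp09, _⟩ := pvPos_mem.mp hp0P
        have hEmF : ((pvAllowed brokens).filter (fun d => 0 < d)).isEmpty = false := by
          cases hP : ((pvAllowed brokens).filter (fun d => 0 < d)).isEmpty
          · rfl
          · exact absurd (List.isEmpty_iff.mp hP) hPe
        by_cases hguard : m < ((pvAllowed brokens).filter (fun d => 0 < d)).headD 0
        · have hnone : pvFloorPos (pvAllowed brokens) ((pvAllowed brokens).filter (fun d => 0 < d)) m = none := by
            rw [pvFloorPos, if_pos]
            simp only [Bool.or_eq_true, decide_eq_true_eq]
            right; exact hguard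
          refine ⟨fun _ x h1 hxm => ?_, fun f hf => by rw [hnone] at hf; cases hf⟩
          by_contra hc
          rw [Bool.not_eq_false] at hc
          have hx9 : x ≤ 9 := by omega
          have := hp0min x (hsingle x h1 hx9 hc)
          omega
        · push_neg at hguard
          have hgF : (((pvAllowed brokens).filter (fun d => 0 < d)).isEmpty
              || decide (m < ((pvAllowed brokens).filter (fun d => 0 < d)).headD 0)) = false := by
            rw [hEmF]
            simp only [Bool.false_or, decide_eq_false_iff_not]
            omega
          by_cases h9 : 9 < m
          · -- multi-digit m
            have hfd : PySem.Int.floordiv m 10 = m / 10 :=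
              PySem.Int.floordiv_eq_ediv_of_pos (by omega)
            have hmd : PySem.Int.mod m 10 = m % 10 :=
              PySem.Int.mod_eq_emod_of_pos (by omega)
            have hq1 : 1 ≤ m / 10 := by omega
            have hihq := ih (m / 10 - 1) (by omega)
            have hAne : pvAllowed brokens ≠ [] := by
              intro h
              apply hPe
              rw [h]
              rfl
            obtain ⟨hlastA_mem, hlastA_max⟩ := pvLast_max hApair hAne
            obtain ⟨hlastP_mem, hlastP_max⟩ := pvLast_max hPpair hPe
            obtain ⟨hlastP1, hlastP9, _⟩ := pvPos_mem.mp hlastP_mem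
            have hlastA_rng := hmemA _ hlastA_mem
            have hdec : ∀ x : Int, 10 ≤ x → pvOkPos (pvAllowed brokens) x = true →
                pvOkPos (pvAllowed brokens) (x / 10) = true ∧ (x % 10) ∈ pvAllowed brokens ∧ 1 ≤ x / 10 := by
              intro x hx hok
              have hx' : 10 * (x / 10) + x % 10 = x := by omega
              have hde := pvOkPos_decomp (allowed := pvAllowed brokens)
                (q := x / 10) (r := x % 10) (by omega) (by omega) (by omega)
              rw [hx'] at hde
              rw [hde, Bool.and_eq_true] at hok
              exact ⟨hok.1, pvContains_iff.mp hok.2, by omega⟩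
            have heval : pvFloorPos (pvAllowed brokens) ((pvAllowed brokens).filter (fun d => 0 < d)) m
                = (if pvOkPos (pvAllowed brokens) (m / 10) then
                    match PySem.List.max? ((pvAllowed brokens).filter (fun d => d ≤ m % 10)) (fun d => d) with
                    | some lo => some (10 * (m / 10) + lo)
                    | none =>
                      match pvFloorPos (pvAllowed brokens) ((pvAllowed brokens).filter (fun d => 0 < d)) (m / 10 - 1) with
                      | some f => some (10 * f + PySem.List.pyGetD (pvAllowed brokens) (-1) 0)
                      | none => some (PySem.List.pyGetD ((pvAllowed brokens).filter (fun d => 0 < d)) (-1) 0)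
                  else
                    match pvFloorPos (pvAllowed brokens) ((pvAllowed brokens).filter (fun d => 0 < d)) (m / 10 - 1) with
                    | some f => some (10 * f + PySem.List.pyGetD (pvAllowed brokens) (-1) 0)
                    | none => some (PySem.List.pyGetD ((pvAllowed brokens).filter (fun d => 0 < d)) (-1) 0)) := by
              rw [pvFloorPos, if_neg (by rw [hgF]; simp), if_pos h9, hfd, hmd]
            -- the fallback value (used when the same-prefix candidate is impossible)
            have htail : ∀ (hside : pvOkPos (pvAllowed brokens) (m / 10) = false ∨
                  (pvAllowed brokens).filter (fun d => decide (d ≤ m % 10)) = []),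
                ∀ f, (match pvFloorPos (pvAllowed brokens) ((pvAllowed brokens).filter (fun d => 0 < d)) (m / 10 - 1) with
                      | some f => some (10 * f + PySem.List.pyGetD (pvAllowed brokens) (-1) 0)
                      | none => some (PySem.List.pyGetD ((pvAllowed brokens).filter (fun d => 0 < d)) (-1) 0)) = some f →
                  1 ≤ f ∧ f ≤ m ∧ pvOkPos (pvAllowed brokens) f = true ∧
                  ∀ x, 1 ≤ x → x ≤ m → pvOkPos (pvAllowed brokens) x = true → x ≤ f := by
              intro hside f hf
              have hnoq : ∀ x, 1 ≤ x → x ≤ m → pvOkPos (pvAllowed brokens) x = true →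
                  10 ≤ x → x / 10 ≤ m / 10 - 1 := by
                intro x h1 hxm hok h10
                obtain ⟨hoka, hbmem, ha1⟩ := hdec x h10 hok
                have hqle : x / 10 ≤ m / 10 := by omega
                by_contra hgt
                have haq : x / 10 = m / 10 := by omega
                rcases hside with hside | hside
                · rw [haq] at hoka
                  rw [hoka] at hside
                  cases hside
                · have hbr : x % 10 ≤ m % 10 := by omega
                  have : (x % 10) ∈ (pvAllowed brokens).filter (fun d => decide (d ≤ m % 10)) :=
                    List.mem_filter.mpr ⟨hbmem, by simp only [decide_eq_true_eq]; exact hbr⟩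
                  rw [hside] at this
                  exact absurd this (List.not_mem_nil)
              cases hfq : pvFloorPos (pvAllowed brokens) ((pvAllowed brokens).filter (fun d => 0 < d)) (m / 10 - 1) with
              | some f' =>
                rw [hfq] at hf
                obtain rfl : 10 * f' + PySem.List.pyGetD (pvAllowed brokens) (-1) 0 = f := by injection hf
                obtain ⟨hf1, hfle, hfok, hfmax⟩ := hihq.2 f' hfq
                refine ⟨by omega, by omega, ?_, ?_⟩
                · have := pvOkPos_decomp (allowed := pvAllowed brokens)
                    (q := f') (r := PySem.List.pyGetD (pvAllowed brokens) (-1) 0) hf1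
                    (by omega) (by omega)
                  rw [this, hfok, Bool.true_and, pvContains_iff]
                  exact hlastA_mem
                · intro x h1 hxm hok
                  by_cases h10 : 10 ≤ x
                  · obtain ⟨hoka, hbmem, ha1⟩ := hdec x h10 hok
                    have h1' := hnoq x h1 hxm hok h10
                    have h2' := hfmax (x / 10) ha1 h1' hoka
                    have h3' := hlastA_max _ hbmem
                    omega
                  · omega
              | none =>
                rw [hfq] at hf
                obtain rfl : PySem.List.pyGetD ((pvAllowed brokens).filter (fun d => 0 < d)) (-1) 0 = f := by injection hf
                refine ⟨by omega, by omega, hokA _ (List.mem_filter.mp hlastP_mem).1, ?_⟩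
                intro x h1 hxm hok
                by_cases h10 : 10 ≤ x
                · obtain ⟨hoka, hbmem, ha1⟩ := hdec x h10 hok
                  have h1' := hnoq x h1 hxm hok h10
                  have := hihq.1 hfq (x / 10) ha1 h1'
                  rw [this] at hoka
                  cases hoka
                · exact le_trans (hlastP_max x (hsingle x h1 (by omega) hok)) (le_refl _)
            rw [heval]
            by_cases hok : pvOkPos (pvAllowed brokens) (m / 10) = true
            · rw [if_pos hok]
              cases hmax : PySem.List.max? ((pvAllowed brokens).filter (fun d => d ≤ m % 10)) (fun d => d) with
              | some lo =>
                constructor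
                · intro h; cases h
                · intro f hf
                  obtain rfl : 10 * (m / 10) + lo = f := by injection hf
                  have hloF := PySem.List.max?_mem hmax
                  rw [List.mem_filter] at hloF
                  obtain ⟨hloA, hlor⟩ := hloF
                  rw [decide_eq_true_eq] at hlor
                  have hlo_rng := hmemA _ hloA
                  refine ⟨by omega, by omega, ?_, ?_⟩
                  · have := pvOkPos_decomp (allowed := pvAllowed brokens)
                      (q := m / 10) (r := lo) hq1 (by omega) (by omega)
                    rw [this, hok, Bool.true_and, pvContains_iff]
                    exact hloA
                  · intro x h1 hxm hokx
                    by_cases h10 : 10 ≤ x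
                    · obtain ⟨hoka, hbmem, ha1⟩ := hdec x h10 hokx
                      have hqle : x / 10 ≤ m / 10 := by omega
                      by_cases haq : x / 10 = m / 10
                      · have hbr : x % 10 ≤ m % 10 := by omega
                        have hbF : (x % 10) ∈ (pvAllowed brokens).filter (fun d => decide (d ≤ m % 10)) :=
                          List.mem_filter.mpr ⟨hbmem, by simp only [decide_eq_true_eq]; exact hbr⟩
                        have := PySem.List.max?_isMax hmax _ hbF
                        omega
                      · have hble := hmemA _ hbmem
                        omega
                    · omega
              | none =>
                constructor
                · intro h
                  cases hfq : pvFloorPos (pvAllowed brokens) ((pvAllowed brokens).filter (fun d => 0 < d)) (m / 10 - 1) with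
                  | some f' => rw [hfq] at h; simp at h
                  | none => rw [hfq] at h; simp at h
                · exact htail (Or.inr ((PySem.List.max?_eq_none_iff _ _).mp hmax))
            · rw [if_neg hok]
              have hokf : pvOkPos (pvAllowed brokens) (m / 10) = false := by
                simp at hok; exact hok
              constructor
              · intro h
                cases hfq : pvFloorPos (pvAllowed brokens) ((pvAllowed brokens).filter (fun d => 0 < d)) (m / 10 - 1) with
                | some f' => rw [hfq] at h; simp at h
                | none => rw [hfq] at h; simp at h
              · exact htail (Or.inl hokf)
          · -- single-digit m : result is max? (pos.filter (· ≤ m))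
            push_neg at h9
            have hp0f : ((pvAllowed brokens).filter (fun d => 0 < d)).headD 0
                ∈ ((pvAllowed brokens).filter (fun d => 0 < d)).filter (fun d => decide (d ≤ m)) :=
              List.mem_filter.mpr ⟨hp0P, by simp only [decide_eq_true_eq]; omega⟩
            have heval : pvFloorPos (pvAllowed brokens) ((pvAllowed brokens).filter (fun d => 0 < d)) m
                = PySem.List.max? (((pvAllowed brokens).filter (fun d => 0 < d)).filter (fun d => d ≤ m)) (fun d => d) := by
              rw [pvFloorPos, if_neg (by rw [hgF]; simp), if_neg (by omega)]
            cases hmax : PySem.List.max? (((pvAllowed brokens).filter (fun d => 0 < d)).filter (fun d => d ≤ m)) (fun d => d) with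
            | none =>
              rw [PySem.List.max?_eq_none_iff] at hmax
              rw [hmax] at hp0f
              exact absurd hp0f (List.not_mem_nil)
            | some lo =>
              rw [heval, hmax]
              constructor
              · intro h; cases h
              · intro f hf
                obtain rfl : lo = f := by injection hf
                have hloF := PySem.List.max?_mem hmax
                rw [List.mem_filter] at hloF
                obtain ⟨hloP, hlom⟩ := hloF
                obtain ⟨hlo1, hlo9, _⟩ := pvPos_mem.mp hloP
                refine ⟨hlo1, by simpa using hlom, hokA lo (List.mem_filter.mp hloP).1, ?_⟩
                intro x h1 hxm hok
                have hx9 : x ≤ 9 := by omega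
                have hxF : x ∈ (((pvAllowed brokens).filter (fun d => 0 < d)).filter (fun d => decide (d ≤ m))) :=
                  List.mem_filter.mpr ⟨hsingle x h1 hx9 hok, by simp only [decide_eq_true_eq]; exact hxm⟩
                exact PySem.List.max?_isMax hmax x hxF
  intro m
  exact main (m.toNat + 1) m (by omega)

-- CEIL: complete characterisation of pvCeilPos
lemma pvCeilPos_spec (brokens : List String)
    (hpos : (pvAllowed brokens).filter (fun d => 0 < d) ≠ []) : ∀ (m : Int), 1 ≤ m →
    ∃ c, pvCeilPos (pvAllowed brokens) ((pvAllowed brokens).filter (fun d => 0 < d)) m = some c ∧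
      m ≤ c ∧ 1 ≤ c ∧ pvOkPos (pvAllowed brokens) c = true ∧
      ∀ x, m ≤ x → pvOkPos (pvAllowed brokens) x = true → c ≤ x := by
  have hApair : (pvAllowed brokens).Pairwise (· < ·) := pvAllowed_pairwise brokens
  have hPpair : ((pvAllowed brokens).filter (fun d => 0 < d)).Pairwise (· < ·) := hApair.filter _
  have hmemA : ∀ d ∈ pvAllowed brokens, 0 ≤ d ∧ d < 10 := by
    intro d hd; have := pvMem_allowed.mp hd; exact ⟨this.1, this.2.1⟩
  have hokA : ∀ d ∈ pvAllowed brokens, pvOkPos (pvAllowed brokens) d = true := by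
    intro d hd
    rw [pvOkPos_small (by have := hmemA d hd; omega), pvContains_iff]
    exact hd
  have hsingle : ∀ x : Int, 1 ≤ x → x ≤ 9 → pvOkPos (pvAllowed brokens) x = true →
      x ∈ (pvAllowed brokens).filter (fun d => 0 < d) := by
    intro x h1 h9 hok
    rw [pvOkPos_small h9, pvContains_iff] at hok
    exact List.mem_filter.mpr ⟨hok, by simp; omega⟩
  have hAne : pvAllowed brokens ≠ [] := by
    intro h; apply hpos; rw [h]; rfl
  have hEmF : ((pvAllowed brokens).filter (fun d => 0 < d)).isEmpty = false := by
    cases hP : ((pvAllowed brokens).filter (fun d => 0 < d)).isEmpty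
    · rfl
    · exact absurd (List.isEmpty_iff.mp hP) hpos
  obtain ⟨hp0P, hp0min⟩ := pvHead_min hPpair hpos
  obtain ⟨hp01, hp09, _⟩ := pvPos_mem.mp hp0P
  obtain ⟨ha0A, ha0min⟩ := pvHead_min hApair hAne
  have ha0g : PySem.List.pyGetD (pvAllowed brokens) 0 0 = (pvAllowed brokens).headD 0 := by
    rw [PySem.List.pyGetD_zero]
    cases h : pvAllowed brokens with
    | nil => exact absurd h hAne
    | cons a t => rfl
  have ha0rng := hmemA _ ha0A
  have hp0le : ∀ a : Int, 1 ≤ a → pvOkPos (pvAllowed brokens) a = true →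
      ((pvAllowed brokens).filter (fun d => 0 < d)).headD 0 ≤ a := by
    intro a h1 hok
    by_cases h9 : a ≤ 9
    · exact hp0min a (hsingle a h1 h9 hok)
    · omega
  have hdec : ∀ x : Int, 10 ≤ x → pvOkPos (pvAllowed brokens) x = true →
      pvOkPos (pvAllowed brokens) (x / 10) = true ∧ (x % 10) ∈ pvAllowed brokens ∧ 1 ≤ x / 10 := by
    intro x hx hok
    have hx' : 10 * (x / 10) + x % 10 = x := by omega
    have hde := pvOkPos_decomp (allowed := pvAllowed brokens)
      (q := x / 10) (r := x % 10) (by omega) (by omega) (by omega)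
    rw [hx'] at hde
    rw [hde, Bool.and_eq_true] at hok
    exact ⟨hok.1, pvContains_iff.mp hok.2, by omega⟩
  have main : ∀ N : Nat, ∀ m : Int, m.toNat < N → 1 ≤ m →
      ∃ c, pvCeilPos (pvAllowed brokens) ((pvAllowed brokens).filter (fun d => 0 < d)) m = some c ∧
        m ≤ c ∧ 1 ≤ c ∧ pvOkPos (pvAllowed brokens) c = true ∧
        ∀ x, m ≤ x → pvOkPos (pvAllowed brokens) x = true → c ≤ x := by
    intro N
    induction N with
    | zero => intro m hm h1; omega
    | succ N ih =>
      intro m hm h1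
      by_cases hm0 : m ≤ ((pvAllowed brokens).filter (fun d => 0 < d)).headD 0
      · refine ⟨((pvAllowed brokens).filter (fun d => 0 < d)).headD 0, ?_, hm0, by omega,
          hokA _ (List.mem_filter.mp hp0P).1, ?_⟩
        · rw [pvCeilPos, if_neg (by rw [hEmF]; simp), if_pos hm0]
        · intro x hx hok
          exact hp0le x (by omega) hok
      · push_neg at hm0
        by_cases h9 : 9 < m
        · -- multi-digit m
          have hfd : PySem.Int.floordiv m 10 = m / 10 :=
            PySem.Int.floordiv_eq_ediv_of_pos (by omega)
          have hmd : PySem.Int.mod m 10 = m % 10 :=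
            PySem.Int.mod_eq_emod_of_pos (by omega)
          have hq1 : 1 ≤ m / 10 := by omega
          obtain ⟨c', hc'eq, hc'ge, hc'1, hc'ok, hc'min⟩ :=
            ih (m / 10 + 1) (by omega) (by omega)
          have heval : pvCeilPos (pvAllowed brokens) ((pvAllowed brokens).filter (fun d => 0 < d)) m
              = (if pvOkPos (pvAllowed brokens) (m / 10) then
                  match PySem.List.min? ((pvAllowed brokens).filter (fun d => m % 10 ≤ d)) (fun d => d) with
                  | some hi => some (10 * (m / 10) + hi)
                  | none =>
                    match pvCeilPos (pvAllowed brokens) ((pvAllowed brokens).filter (fun d => 0 < d)) (m / 10 + 1) with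
                    | some c => some (10 * c + PySem.List.pyGetD (pvAllowed brokens) 0 0)
                    | none => none
                else
                  match pvCeilPos (pvAllowed brokens) ((pvAllowed brokens).filter (fun d => 0 < d)) (m / 10 + 1) with
                  | some c => some (10 * c + PySem.List.pyGetD (pvAllowed brokens) 0 0)
                  | none => none) := by
            rw [pvCeilPos, if_neg (by rw [hEmF]; simp), if_neg (by omega), if_pos h9, hfd, hmd]
          have hnoq : ∀ (hside : pvOkPos (pvAllowed brokens) (m / 10) = false ∨
                (pvAllowed brokens).filter (fun d => decide (m % 10 ≤ d)) = []),
              ∀ x, m ≤ x → pvOkPos (pvAllowed brokens) x = true → m / 10 + 1 ≤ x / 10 := by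
            intro hside x hxm hok
            have h10 : 10 ≤ x := by omega
            obtain ⟨hoka, hbmem, ha1⟩ := hdec x h10 hok
            have hqge : m / 10 ≤ x / 10 := by omega
            by_contra hlt
            have haq : x / 10 = m / 10 := by omega
            rcases hside with hside | hside
            · rw [haq] at hoka; rw [hoka] at hside; cases hside
            · have hbr : m % 10 ≤ x % 10 := by omega
              have : (x % 10) ∈ (pvAllowed brokens).filter (fun d => decide (m % 10 ≤ d)) :=
                List.mem_filter.mpr ⟨hbmem, by simp only [decide_eq_true_eq]; exact hbr⟩
              rw [hside] at this
              exact absurd this (List.not_mem_nil)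
          have htail : ∀ (hside : pvOkPos (pvAllowed brokens) (m / 10) = false ∨
                (pvAllowed brokens).filter (fun d => decide (m % 10 ≤ d)) = []),
              m ≤ 10 * c' + PySem.List.pyGetD (pvAllowed brokens) 0 0 ∧
              1 ≤ 10 * c' + PySem.List.pyGetD (pvAllowed brokens) 0 0 ∧
              pvOkPos (pvAllowed brokens) (10 * c' + PySem.List.pyGetD (pvAllowed brokens) 0 0) = true ∧
              ∀ x, m ≤ x → pvOkPos (pvAllowed brokens) x = true →
                10 * c' + PySem.List.pyGetD (pvAllowed brokens) 0 0 ≤ x := by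
            intro hside
            rw [ha0g]
            refine ⟨by omega, by omega, ?_, ?_⟩
            · have := pvOkPos_decomp (allowed := pvAllowed brokens)
                (q := c') (r := (pvAllowed brokens).headD 0) hc'1 (by omega) (by omega)
              rw [this, hc'ok, Bool.true_and, pvContains_iff]
              exact ha0A
            · intro x hxm hok
              have h10 : 10 ≤ x := by omega
              obtain ⟨hoka, hbmem, ha1⟩ := hdec x h10 hok
              have h1' := hnoq hside x hxm hok
              have h2' := hc'min (x / 10) (by omega) hoka
              have h3' := ha0min _ hbmem
              omega
          rw [heval]
          by_cases hok : pvOkPos (pvAllowed brokens) (m / 10) = true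
          · rw [if_pos hok]
            cases hminr : PySem.List.min? ((pvAllowed brokens).filter (fun d => m % 10 ≤ d)) (fun d => d) with
            | some hi =>
              have hhiF := PySem.List.min?_mem hminr
              rw [List.mem_filter] at hhiF
              obtain ⟨hhiA, hhir⟩ := hhiF
              rw [decide_eq_true_eq] at hhir
              have hhirng := hmemA _ hhiA
              refine ⟨10 * (m / 10) + hi, rfl, by omega, by omega, ?_, ?_⟩
              · have := pvOkPos_decomp (allowed := pvAllowed brokens)
                  (q := m / 10) (r := hi) hq1 (by omega) (by omega)
                rw [this, hok, Bool.true_and, pvContains_iff]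
                exact hhiA
              · intro x hxm hokx
                have h10 : 10 ≤ x := by omega
                obtain ⟨hoka, hbmem, ha1⟩ := hdec x h10 hokx
                have hqge : m / 10 ≤ x / 10 := by omega
                by_cases haq : x / 10 = m / 10
                · have hbr : m % 10 ≤ x % 10 := by omega
                  have hbF : (x % 10) ∈ (pvAllowed brokens).filter (fun d => decide (m % 10 ≤ d)) :=
                    List.mem_filter.mpr ⟨hbmem, by simp only [decide_eq_true_eq]; exact hbr⟩
                  have := PySem.List.min?_isMin hminr _ hbF
                  omega
                · have := hmemA _ hbmem
                  omega
            | none =>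
              rw [hc'eq]
              obtain ⟨hh1, hh2, hh3, hh4⟩ :=
                htail (Or.inr ((PySem.List.min?_eq_none_iff _ _).mp hminr))
              exact ⟨_, rfl, hh1, hh2, hh3, hh4⟩
          · rw [if_neg hok]
            have hokf : pvOkPos (pvAllowed brokens) (m / 10) = false := by
              simp at hok; exact hok
            rw [hc'eq]
            obtain ⟨hh1, hh2, hh3, hh4⟩ := htail (Or.inl hokf)
            exact ⟨_, rfl, hh1, hh2, hh3, hh4⟩
        · -- single-digit m, above pos[0]
          push_neg at h9
          have heval : pvCeilPos (pvAllowed brokens) ((pvAllowed brokens).filter (fun d => 0 < d)) m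
              = (match PySem.List.min? (((pvAllowed brokens).filter (fun d => 0 < d)).filter (fun d => m ≤ d)) (fun d => d) with
                  | some hi => some hi
                  | none => some (10 * ((pvAllowed brokens).filter (fun d => 0 < d)).headD 0
                      + PySem.List.pyGetD (pvAllowed brokens) 0 0)) := by
            rw [pvCeilPos, if_neg (by rw [hEmF]; simp), if_neg (by omega), if_neg (by omega)]
          rw [heval]
          cases hminr : PySem.List.min? (((pvAllowed brokens).filter (fun d => 0 < d)).filter (fun d => m ≤ d)) (fun d => d) with
          | some hi =>
            have hhiF := PySem.List.min?_mem hminr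
            rw [List.mem_filter] at hhiF
            obtain ⟨hhiP, hhim⟩ := hhiF
            rw [decide_eq_true_eq] at hhim
            obtain ⟨hhi1, hhi9, _⟩ := pvPos_mem.mp hhiP
            refine ⟨hi, rfl, hhim, hhi1, hokA _ (List.mem_filter.mp hhiP).1, ?_⟩
            intro x hxm hok
            by_cases hx9 : x ≤ 9
            · have hxF : x ∈ (((pvAllowed brokens).filter (fun d => 0 < d)).filter (fun d => decide (m ≤ d))) :=
                List.mem_filter.mpr ⟨hsingle x (by omega) hx9 hok, by simp only [decide_eq_true_eq]; exact hxm⟩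
              exact PySem.List.min?_isMin hminr _ hxF
            · omega
          | none =>
            rw [ha0g]
            have hfe := (PySem.List.min?_eq_none_iff _ _).mp hminr
            refine ⟨_, rfl, by omega, by omega, ?_, ?_⟩
            · have := pvOkPos_decomp (allowed := pvAllowed brokens)
                (q := ((pvAllowed brokens).filter (fun d => 0 < d)).headD 0)
                (r := (pvAllowed brokens).headD 0) (by omega) (by omega) (by omega)
              rw [this, hokA _ (List.mem_filter.mp hp0P).1, Bool.true_and, pvContains_iff]
              exact ha0A
            · intro x hxm hok
              by_cases hx9 : x ≤ 9
              · have hxF : x ∈ (((pvAllowed brokens).filter (fun d => 0 < d)).filter (fun d => decide (m ≤ d))) :=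
                  List.mem_filter.mpr ⟨hsingle x (by omega) hx9 hok, by simp only [decide_eq_true_eq]; exact hxm⟩
                rw [hfe] at hxF
                exact absurd hxF (List.not_mem_nil)
              · have h10 : 10 ≤ x := by omega
                obtain ⟨hoka, hbmem, ha1⟩ := hdec x h10 hok
                have h2' := hp0le (x / 10) ha1 hoka
                have h3' := ha0min _ hbmem
                omega
  intro m h1
  exact main (m.toNat + 1) m (by omega) h1

-- ---------- candidate characterisation ----------

-- pvGoodU x: A's test of value x passes
def pvGoodU (brokens : List String) (x : Int) : Prop := pvBadChars brokens x = false

lemma pvDownCand_spec {brokens : List String} {n : Int} :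
    (∀ d, pvDownCand brokens n = some d →
      brokens.contains "+" = false ∧ 0 ≤ d ∧ d ≤ n ∧ pvGoodU brokens d ∧
      ∀ x, 0 ≤ x → x ≤ n → pvGoodU brokens x → x ≤ d) ∧
    (pvDownCand brokens n = none →
      ¬(brokens.contains "+" = false ∧ 0 ≤ n) ∨ (∀ x, 0 ≤ x → x ≤ n → ¬ pvGoodU brokens x)) := by
  have hgood : ∀ x : Int, 0 ≤ x → (pvGoodU brokens x ↔ pvOkPos (pvAllowed brokens) x = true) := by
    intro x hx
    rw [pvGoodU, pvBad_iff_not_ok hx]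
    cases pvOkPos (pvAllowed brokens) x <;> simp
  have hgoodneg : ∀ x : Int, x < 0 → brokens.contains "-" = false →
      (pvGoodU brokens x ↔ pvOkPos (pvAllowed brokens) (-x) = true) := by
    intro x hx hm
    rw [pvGoodU, pvBad_neg hx hm, ← pvGoodU]
    exact hgood (-x) (by omega)
  have hzero : pvGoodU brokens 0 ↔ (pvAllowed brokens).contains 0 = true := by
    rw [hgood 0 (le_refl 0), pvOkPos_small (by omega)]
  have hfl := pvFloorPos_spec brokens n
  constructor
  · intro d hd
    rw [pvDownCand] at hd
    by_cases hc : (!(brokens.contains "+") && decide (0 ≤ n)) = true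
    · rw [if_pos hc] at hd
      rw [Bool.and_eq_true, Bool.not_eq_true', decide_eq_true_eq] at hc
      obtain ⟨hplus, h0n⟩ := hc
      cases hq : pvFloorPos (pvAllowed brokens) ((pvAllowed brokens).filter (fun d => 0 < d)) n with
      | some f =>
        rw [hq] at hd
        obtain rfl : f = d := by injection hd
        obtain ⟨hd1, hdn, hdok, hdmax⟩ := hfl.2 f hq
        refine ⟨hplus, by omega, hdn, (hgood f (by omega)).mpr hdok, ?_⟩
        intro x hx0 hxn hgx
        by_cases hx1 : 1 ≤ x
        · exact hdmax x hx1 hxn ((hgood x hx0).mp hgx)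
        · omega
      | none =>
        rw [hq] at hd
        by_cases hz : (pvAllowed brokens).contains 0 = true
        · rw [if_pos hz] at hd
          obtain rfl : (0 : Int) = d := by injection hd
          refine ⟨hplus, le_refl 0, h0n, hzero.mpr hz, ?_⟩
          intro x hx0 hxn hgx
          by_cases hx1 : 1 ≤ x
          · have := hfl.1 hq x hx1 hxn
            rw [(hgood x hx0).mp hgx] at this
            cases this
          · omega
        · rw [if_neg hz] at hd; cases hd
    · rw [if_neg hc] at hd; cases hd
  · intro hnone
    rw [pvDownCand] at hnone
    by_cases hc : (!(brokens.contains "+") && decide (0 ≤ n)) = true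
    · rw [if_pos hc] at hnone
      right
      cases hq : pvFloorPos (pvAllowed brokens) ((pvAllowed brokens).filter (fun d => 0 < d)) n with
      | some f => rw [hq] at hnone; cases hnone
      | none =>
        rw [hq] at hnone
        by_cases hz : (pvAllowed brokens).contains 0 = true
        · rw [if_pos hz] at hnone; cases hnone
        · intro x hx0 hxn hgx
          by_cases hx1 : 1 ≤ x
          · have := hfl.1 hq x hx1 hxn
            rw [(hgood x hx0).mp hgx] at this
            cases this
          · obtain rfl : x = 0 := by omega
            exact hz (hzero.mp hgx)
    · left
      intro ⟨h1, h2⟩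
      apply hc
      rw [Bool.and_eq_true, Bool.not_eq_true', decide_eq_true_eq]
      exact ⟨h1, h2⟩

lemma pvUpCand_spec {brokens : List String} {n : Int} :
    (∀ u, pvUpCand brokens n = some u →
      brokens.contains "-" = false ∧ n ≤ u ∧ pvGoodU brokens u ∧
      ∀ x, n ≤ x → pvGoodU brokens x → u ≤ x) ∧
    (pvUpCand brokens n = none →
      brokens.contains "-" = true ∨ (∀ x, n ≤ x → ¬ pvGoodU brokens x)) := by
  have hgood : ∀ x : Int, 0 ≤ x → (pvGoodU brokens x ↔ pvOkPos (pvAllowed brokens) x = true) := by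
    intro x hx
    rw [pvGoodU, pvBad_iff_not_ok hx]
    cases pvOkPos (pvAllowed brokens) x <;> simp
  have hgoodneg : ∀ x : Int, x < 0 → brokens.contains "-" = false →
      (pvGoodU brokens x ↔ pvOkPos (pvAllowed brokens) (-x) = true) := by
    intro x hx hm
    rw [pvGoodU, pvBad_neg hx hm, ← pvGoodU]
    exact hgood (-x) (by omega)
  have hzero : pvGoodU brokens 0 ↔ (pvAllowed brokens).contains 0 = true := by
    rw [hgood 0 (le_refl 0), pvOkPos_small (by omega)]
  constructor
  · intro u hu
    rw [pvUpCand] at hu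
    by_cases hMf : brokens.contains "-" = false
    · rw [if_pos (by rw [hMf]; rfl)] at hu
      refine And.intro hMf ?_
      by_cases hn0 : n ≤ 0
      · rw [if_pos hn0] at hu
        have hfl := pvFloorPos_spec brokens (-n)
        cases hq : pvFloorPos (pvAllowed brokens) ((pvAllowed brokens).filter (fun d => 0 < d)) (-n) with
        | some f =>
          rw [hq] at hu
          obtain rfl : -f = u := by injection hu
          obtain ⟨hf1, hfn, hfok, hfmax⟩ := hfl.2 f hq
          refine ⟨by omega, (hgoodneg (-f) (by omega) hMf).mpr (by rw [neg_neg]; exact hfok), ?_⟩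
          intro x hx hgx
          by_cases hxneg : x < 0
          · have hofx := (hgoodneg x hxneg hMf).mp hgx
            have := hfmax (-x) (by omega) (by omega) hofx
            omega
          · omega
        | none =>
          rw [hq] at hu
          by_cases hz : (pvAllowed brokens).contains 0 = true
          · rw [if_pos hz] at hu
            obtain rfl : (0 : Int) = u := by injection hu
            refine ⟨hn0, hzero.mpr hz, ?_⟩
            intro x hx hgx
            by_cases hxneg : x < 0
            · have hofx := (hgoodneg x hxneg hMf).mp hgx
              have := hfl.1 hq (-x) (by omega) (by omega)
              rw [hofx] at this
              cases this
            · omega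
          · rw [if_neg hz] at hu
            by_cases hPe : ((pvAllowed brokens).filter (fun d => 0 < d)) = []
            · rw [if_neg (by rw [List.isEmpty_iff.mpr hPe]; simp)] at hu
              cases hu
            · rw [if_pos (by
                cases hP : ((pvAllowed brokens).filter (fun d => 0 < d)).isEmpty
                · rfl
                · exact absurd (List.isEmpty_iff.mp hP) hPe)] at hu
              obtain ⟨c, hceq, hc1, hcge, hcok, hcmin⟩ := pvCeilPos_spec brokens hPe 1 (le_refl 1)
              rw [hceq] at hu
              obtain rfl : c = u := by injection hu
              refine ⟨by omega, (hgood c (by omega)).mpr hcok, ?_⟩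
              intro x hx hgx
              by_cases hxneg : x < 0
              · have hofx := (hgoodneg x hxneg hMf).mp hgx
                have := pvFloorPos_spec brokens (-n) |>.1 hq (-x) (by omega) (by omega)
                rw [hofx] at this
                cases this
              · by_cases hx1 : 1 ≤ x
                · exact hcmin x hx1 ((hgood x (by omega)).mp hgx)
                · obtain rfl : x = 0 := by omega
                  exact absurd (hzero.mp hgx) hz
      · rw [if_neg hn0] at hu
        by_cases hPe : ((pvAllowed brokens).filter (fun d => 0 < d)) = []
        · rw [if_neg (by rw [List.isEmpty_iff.mpr hPe]; simp)] at hu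
          cases hu
        · rw [if_pos (by
            cases hP : ((pvAllowed brokens).filter (fun d => 0 < d)).isEmpty
            · rfl
            · exact absurd (List.isEmpty_iff.mp hP) hPe)] at hu
          obtain ⟨c, hceq, hc1, hcge, hcok, hcmin⟩ := pvCeilPos_spec brokens hPe n (by omega)
          rw [hceq] at hu
          obtain rfl : c = u := by injection hu
          refine ⟨by omega, (hgood c (by omega)).mpr hcok, ?_⟩
          intro x hx hgx
          exact hcmin x hx ((hgood x (by omega)).mp hgx)
    · rw [if_neg (by simp only [Bool.not_eq_true', Bool.not_eq_true]; simpa using hMf)] at hu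
      cases hu
  · intro hnone
    rw [pvUpCand] at hnone
    by_cases hMf : brokens.contains "-" = false
    · rw [if_pos (by rw [hMf]; rfl)] at hnone
      right
      intro x hx hgx
      by_cases hn0 : n ≤ 0
      · rw [if_pos hn0] at hnone
        cases hq : pvFloorPos (pvAllowed brokens) ((pvAllowed brokens).filter (fun d => 0 < d)) (-n) with
        | some f => rw [hq] at hnone; cases hnone
        | none =>
          rw [hq] at hnone
          by_cases hz : (pvAllowed brokens).contains 0 = true
          · rw [if_pos hz] at hnone; cases hnone
          · rw [if_neg hz] at hnone
            by_cases hPe : ((pvAllowed brokens).filter (fun d => 0 < d)) = []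
            · by_cases hxneg : x < 0
              · have hofx := (hgoodneg x hxneg hMf).mp hgx
                rw [pvOk_of_pos_empty hPe (-x) (by omega)] at hofx
                cases hofx
              · by_cases hx1 : 1 ≤ x
                · have := (hgood x (by omega)).mp hgx
                  rw [pvOk_of_pos_empty hPe x hx1] at this
                  cases this
                · obtain rfl : x = 0 := by omega
                  exact hz (hzero.mp hgx)
            · rw [if_pos (by
                cases hP : ((pvAllowed brokens).filter (fun d => 0 < d)).isEmpty
                · rfl
                · exact absurd (List.isEmpty_iff.mp hP) hPe)] at hnone
              obtain ⟨c, hceq, _, _, _, _⟩ := pvCeilPos_spec brokens hPe 1 (le_refl 1)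
              rw [hceq] at hnone
              cases hnone
      · rw [if_neg hn0] at hnone
        by_cases hPe : ((pvAllowed brokens).filter (fun d => 0 < d)) = []
        · have hx1 : 1 ≤ x := by omega
          have := (hgood x (by omega)).mp hgx
          rw [pvOk_of_pos_empty hPe x hx1] at this
          cases this
        · rw [if_pos (by
            cases hP : ((pvAllowed brokens).filter (fun d => 0 < d)).isEmpty
            · rfl
            · exact absurd (List.isEmpty_iff.mp hP) hPe)] at hnone
          obtain ⟨c, hceq, _, _, _, _⟩ := pvCeilPos_spec brokens hPe n (by omega)
          rw [hceq] at hnone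
          cases hnone
    · left
      cases hb : brokens.contains "-"
      · exact absurd hb hMf
      · rfl

-- ---------- the loop lemma ----------

lemma pvLoopA_returns (brokens : List String) (n : Int) (k : Nat) (res : Int)
    (hmin : ∀ j : Nat, j < k →
      ¬(brokens.contains "+" = false ∧ 0 ≤ n - j ∧ pvGoodU brokens (n - j)) ∧
      ¬(brokens.contains "-" = false ∧ pvGoodU brokens (n + j)))
    (hk : (brokens.contains "+" = false ∧ 0 ≤ n - k ∧ pvGoodU brokens (n - k) ∧ res = n - k)
        ∨ (¬(brokens.contains "+" = false ∧ 0 ≤ n - k ∧ pvGoodU brokens (n - k)) ∧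
            brokens.contains "-" = false ∧ pvGoodU brokens (n + k) ∧ res = n + k)) :
    ∀ (fuel : Nat) (j : Nat) (up down : Int), j ≤ k → k - j < fuel →
      (brokens.contains "-" = false → up = n + j) →
      (brokens.contains "+" = false → down = (if 0 ≤ n then max (n - j) (-1) else n)) →
      pvLoopA brokens fuel up down = some res := by
  intro fuel
  induction fuel with
  | zero => intro j up down hj hfu _ _; omega
  | succ f ihf =>
    intro j up down hj hfu hup hdown
    have hstep : pvLoopA brokens (f + 1) up down
        = (if ((decide (0 ≤ down) && !(brokens.contains "+")) && !(pvBadChars brokens down)) then some down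
           else
             (if !(brokens.contains "-") then
                (if !(pvBadChars brokens up) then some up
                 else pvLoopA brokens f (up + 1)
                   (if ((decide (0 ≤ down) && !(brokens.contains "+")) && pvBadChars brokens down) then down - 1 else down))
              else pvLoopA brokens f up
                (if ((decide (0 ≤ down) && !(brokens.contains "+")) && pvBadChars brokens down) then down - 1 else down))) := rfl
    by_cases hjk : j = k
    · subst hjk
      rcases hk with ⟨hPf, h0nk, hgd, hres⟩ | ⟨hnd, hM, hgu, hres⟩
      · -- the down side returns at step j
        have hdv : down = n - j := by
          rw [hdown hPf, if_pos (by omega)]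
          omega
        have hbadf : pvBadChars brokens (n - j) = false := hgd
        have hcond : ((decide (0 ≤ down) && !(brokens.contains "+")) && !(pvBadChars brokens down)) = true := by
          rw [hdv, hPf, hbadf, decide_eq_true (by omega : (0:Int) ≤ n - j)]
          rfl
        rw [hstep, if_pos hcond, hdv, hres]
      · -- the up side returns at step j
        have hcondF : ((decide (0 ≤ down) && !(brokens.contains "+")) && !(pvBadChars brokens down)) = false := by
          by_cases hP : brokens.contains "+" = false
          · have hdv := hdown hP
            by_cases h0n : 0 ≤ n
            · rw [if_pos h0n] at hdv
              by_cases h0nj : 0 ≤ n - (j : Int)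
              · have hdv' : down = n - j := by omega
                have hbad : pvBadChars brokens (n - j) = true := by
                  by_contra hB
                  rw [Bool.not_eq_true] at hB
                  exact hnd ⟨hP, h0nj, hB⟩
                rw [hdv', hbad]
                simp
              · have hdv' : down = -1 := by omega
                rw [hdv']
                simp
            · rw [if_neg h0n] at hdv
              rw [hdv]
              simp [h0n]
          · have hPt : brokens.contains "+" = true := by
              cases h : brokens.contains "+"
              · exact absurd h hP
              · rfl
            rw [hPt]
            simp
        have hupv := hup hM
        have hbu : pvBadChars brokens up = false := by
          rw [hupv]
          exact hgu
        rw [hstep, if_neg (by rw [hcondF]; simp), if_pos (by rw [hM]; rfl),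
          if_pos (by rw [hbu]; rfl), hupv, hres]
    · have hjlt : j < k := by omega
      obtain ⟨hmd, hmu⟩ := hmin j hjlt
      have hcondF : ((decide (0 ≤ down) && !(brokens.contains "+")) && !(pvBadChars brokens down)) = false := by
        by_cases hP : brokens.contains "+" = false
        · have hdv := hdown hP
          by_cases h0n : 0 ≤ n
          · rw [if_pos h0n] at hdv
            by_cases h0nj : 0 ≤ n - (j : Int)
            · have hdv' : down = n - j := by omega
              have hbad : pvBadChars brokens (n - j) = true := by
                by_contra hB
                rw [Bool.not_eq_true] at hB
                exact hmd ⟨hP, h0nj, hB⟩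
              rw [hdv', hbad]
              simp
            · have hdv' : down = -1 := by omega
              rw [hdv']
              simp
          · rw [if_neg h0n] at hdv
            rw [hdv]
            simp [h0n]
        · have hPt : brokens.contains "+" = true := by
            cases h : brokens.contains "+"
            · exact absurd h hP
            · rfl
          rw [hPt]
          simp
      have hd' : brokens.contains "+" = false →
          (if ((decide (0 ≤ down) && !(brokens.contains "+")) && pvBadChars brokens down) then down - 1 else down)
            = (if 0 ≤ n then max (n - ((j : Int) + 1)) (-1) else n) := by
        intro hP
        have hdv := hdown hP
        by_cases h0n : 0 ≤ n
        · rw [if_pos h0n] at hdv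
          rw [if_pos h0n]
          by_cases h0nj : 0 ≤ n - (j : Int)
          · have hdv' : down = n - j := by omega
            have hbad : pvBadChars brokens (n - j) = true := by
              by_contra hB
              rw [Bool.not_eq_true] at hB
              exact hmd ⟨hP, h0nj, hB⟩
            rw [if_pos (by
              rw [hdv', hbad, hP, decide_eq_true (by omega : (0:Int) ≤ n - j)]
              rfl)]
            omega
          · have hdv' : down = -1 := by omega
            rw [if_neg (by rw [hdv']; simp)]
            omega
        · rw [if_neg h0n] at hdv
          rw [if_neg h0n, if_neg (by rw [hdv]; simp [h0n])]
          exact hdv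
      have hd'inv : brokens.contains "+" = false →
          (if ((decide (0 ≤ down) && !(brokens.contains "+")) && pvBadChars brokens down) then down - 1 else down)
            = (if 0 ≤ n then max (n - ((j + 1 : Nat) : Int)) (-1) else n) := by
        intro hP
        rw [hd' hP]
        have : ((j + 1 : Nat) : Int) = (j : Int) + 1 := by push_cast; ring
        rw [this]
      by_cases hM : brokens.contains "-" = false
      · have hupv := hup hM
        have hbu : pvBadChars brokens up = true := by
          by_contra hB
          rw [Bool.not_eq_true] at hB
          rw [hupv] at hB
          exact hmu ⟨hM, hB⟩
        rw [hstep, if_neg (by rw [hcondF]; simp), if_pos (by rw [hM]; rfl),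
          if_neg (by rw [hbu]; simp)]
        exact ihf (j + 1) (up + 1) _ (by omega) (by omega)
          (fun _ => by rw [hupv]; push_cast; ring) hd'inv
      · have hMt : brokens.contains "-" = true := by
          cases h : brokens.contains "-"
          · exact absurd h hM
          · rfl
        rw [hstep, if_neg (by rw [hcondF]; simp), if_neg (by rw [hMt]; simp)]
        exact ihf (j + 1) up _ (by omega) (by omega)
          (fun h => absurd h hM) hd'inv

-- ---------- size bounds (to discharge the fuel) ----------

-- repdigit witnesses: p, pp, ppp, …  are valid and grow past any bound
def pvRep (p : Int) : Nat → Int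
  | 0 => p
  | (j+1) => pvRep p j * 10 + p

lemma pvRep_ok {brokens : List String} {p : Int}
    (hp : p ∈ (pvAllowed brokens).filter (fun d => 0 < d)) :
    ∀ j, pvOkPos (pvAllowed brokens) (pvRep p j) = true ∧
      10 ^ j ≤ pvRep p j ∧ pvRep p j < 10 ^ (j + 1) := by
  intro j
  induction j with
  | zero =>
    obtain ⟨hp1, hp9, _⟩ := pvPos_mem.mp hp
    have h0 : pvRep p 0 = p := rfl
    refine ⟨?_, by rw [h0]; simpa using hp1, by rw [h0]; simpa using hp9⟩
    rw [h0, pvOkPos_small (by omega), pvContains_iff]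
    exact (List.mem_filter.mp hp).1
  | succ j ihj =>
    obtain ⟨hok, hlo, hhi⟩ := ihj
    obtain ⟨hp1, hp9, _⟩ := pvPos_mem.mp hp
    have hpow : (10 : Int) ^ (j + 1) = 10 ^ j * 10 := pow_succ 10 j
    have hpow2 : (10 : Int) ^ (j + 2) = 10 ^ (j + 1) * 10 := pow_succ 10 (j + 1)
    have hpowpos : (1 : Int) ≤ 10 ^ j := one_le_pow₀ (by omega)
    have heq : pvRep p (j + 1) = 10 * pvRep p j + p := by
      show pvRep p j * 10 + p = _
      ring
    refine ⟨?_, ?_, ?_⟩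
    · rw [heq, pvOkPos_decomp (by omega) (by omega) (by omega), hok, Bool.true_and,
        pvContains_iff]
      exact (List.mem_filter.mp hp).1
    · rw [heq]; omega
    · rw [heq]; omega

-- ---------- final assembly ----------

theorem changeNumber_spec : Claim_equal_changeNumber := by
  intro n brokens hdom hpre
  show changeNumber n brokens = changeNumber_alt n brokens
  have hn31 : -2147483648 ≤ n ∧ n ≤ 2147483648 := by
    unfold Dom_changeNumber at hdom
    rw [Bool.and_eq_true] at hdom
    have h1 := hdom.1
    unfold pvDomInt at h1
    exact of_decide_eq_true h1
  obtain ⟨hdspec_some, hdspec_none⟩ := pvDownCand_spec (brokens := brokens) (n := n)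
  obtain ⟨huspec_some, huspec_none⟩ := pvUpCand_spec (brokens := brokens) (n := n)
  have hgoodbr : ∀ x : Int, 0 ≤ x → pvGoodU brokens x → pvOkPos (pvAllowed brokens) x = true := by
    intro x hx hg
    have hb : pvBadChars brokens x = false := hg
    rw [pvBad_iff_not_ok hx] at hb
    cases h : pvOkPos (pvAllowed brokens) x
    · rw [h] at hb; cases hb
    · rfl
  have hpow10 : (10:Int) ^ 10 = 10000000000 := by norm_num
  have hpow11 : (10:Int) ^ 11 = 100000000000 := by norm_num
  have hub : ∀ u, pvUpCand brokens n = some u → u ≤ 100000000000 := by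
    intro u hu
    obtain ⟨hM, hnu, hug, humin⟩ := huspec_some u hu
    by_cases hPe : ((pvAllowed brokens).filter (fun d => 0 < d)) = []
    · -- no positive allowed digit: every reachable value is ≤ 0
      by_contra h
      push_neg at h
      have hok := hgoodbr u (by omega) hug
      rw [pvOk_of_pos_empty hPe u (by omega)] at hok
      cases hok
    · have hp0mem := (pvHead_min ((pvAllowed_pairwise brokens).filter _) hPe).1
      obtain ⟨hrok, hrlo, hrhi⟩ := pvRep_ok hp0mem 10
      have hg : pvGoodU brokens (pvRep (((pvAllowed brokens).filter (fun d => 0 < d)).headD 0) 10) := by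
        show pvBadChars brokens _ = false
        rw [pvBad_iff_not_ok (by omega), hrok]
        rfl
      have := humin _ (by omega) hg
      omega
  have hup0 : ∀ up' : Int, brokens.contains "-" = false → up' = n → up' = n + ((0 : Nat) : Int) := by
    intro up' _ h; omega
  have hdown0 : n = (if 0 ≤ n then max (n - ((0 : Nat) : Int)) (-1) else n) := by
    split_ifs <;> omega
  unfold changeNumber changeNumber_alt
  cases hD : pvDownCand brokens n with
  | some d =>
    obtain ⟨hplus, hd0, hdn, hdgood, hdmax⟩ := hdspec_some d hD
    cases hU : pvUpCand brokens n with
    | some u =>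
      obtain ⟨hminus, hnu, hugood, humin⟩ := huspec_some u hU
      by_cases htie : n - d ≤ u - n
      · have hnk : n - (((n - d).toNat : Nat) : Int) = d := by omega
        have hloop := pvLoopA_returns brokens n (n - d).toNat d
          (by
            intro j hj
            constructor
            · rintro ⟨hP, h0nj, hgj⟩
              have := hdmax (n - j) (by omega) (by omega) hgj
              omega
            · rintro ⟨hM, hgj⟩
              have := humin (n + j) (by omega) hgj
              omega)
          (Or.inl ⟨hplus, by omega, by rw [hnk]; exact hdgood, by rw [hnk]⟩)
          100000000000000 0 n n (by omega) (by omega) (fun h => by omega) (fun _ => hdown0)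
        rw [hloop]
        simp [htie]
      · have hnk : n + (((u - n).toNat : Nat) : Int) = u := by omega
        have hloop := pvLoopA_returns brokens n (u - n).toNat u
          (by
            intro j hj
            constructor
            · rintro ⟨hP, h0nj, hgj⟩
              have := hdmax (n - j) (by omega) (by omega) hgj
              omega
            · rintro ⟨hM, hgj⟩
              have := humin (n + j) (by omega) hgj
              omega)
          (Or.inr ⟨by
              rintro ⟨hP, h0nj, hgj⟩
              have := hdmax (n - (u - n).toNat) (by omega) (by omega) hgj
              omega,
            hminus, by rw [hnk]; exact hugood, by rw [hnk]⟩)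
          100000000000000 0 n n (by omega) (by have := hub u hU; omega)
          (fun h => by omega) (fun _ => hdown0)
        rw [hloop]
        simp [htie]
    | none =>
      have hnk : n - (((n - d).toNat : Nat) : Int) = d := by omega
      have hloop := pvLoopA_returns brokens n (n - d).toNat d
        (by
          intro j hj
          constructor
          · rintro ⟨hP, h0nj, hgj⟩
            have := hdmax (n - j) (by omega) (by omega) hgj
            omega
          · rintro ⟨hM, hgj⟩
            rcases huspec_none hU with h | h
            · rw [h] at hM; cases hM
            · exact h (n + j) (by omega) hgj)
        (Or.inl ⟨hplus, by omega, by rw [hnk]; exact hdgood, by rw [hnk]⟩)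
        100000000000000 0 n n (by omega) (by omega) (fun h => by omega) (fun _ => hdown0)
      rw [hloop]
      simp
  | none =>
    cases hU : pvUpCand brokens n with
    | some u =>
      obtain ⟨hminus, hnu, hugood, humin⟩ := huspec_some u hU
      have hdeadD : ∀ j : Nat, ¬(brokens.contains "+" = false ∧ 0 ≤ n - (j : Int) ∧ pvGoodU brokens (n - (j : Int))) := by
        rintro j ⟨hP, h0nj, hgj⟩
        rcases hdspec_none hD with h | h
        · exact h ⟨hP, by omega⟩
        · exact h (n - (j : Int)) (by omega) (by omega) hgj
      have hnk : n + (((u - n).toNat : Nat) : Int) = u := by omega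
      have hloop := pvLoopA_returns brokens n (u - n).toNat u
        (by
          intro j hj
          refine ⟨hdeadD j, ?_⟩
          rintro ⟨hM, hgj⟩
          have := humin (n + j) (by omega) hgj
          omega)
        (Or.inr ⟨hdeadD _, hminus, by rw [hnk]; exact hugood, by rw [hnk]⟩)
        100000000000000 0 n n (by omega) (by have := hub u hU; omega)
        (fun h => by omega) (fun _ => hdown0)
      rw [hloop]
      simp
    | none =>
      exfalso
      rcases hpre with ⟨hplusmem, h0n, d, hdrange, hdnotin, hdn⟩ | ⟨hminmem, hcase⟩
      · rw [PySem.List.mem_pyRange_one] at hdrange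
        rcases hdspec_none hD with h | h
        · refine h ⟨?_, h0n⟩
          cases hb : brokens.contains "+"
          · rfl
          · exact absurd (pvContains_iff.mp hb) hplusmem
        · refine h d (by omega) hdn ?_
          show pvBadChars brokens d = false
          rw [pvBad_small (by omega) (by omega)]
          cases hb : brokens.contains (PySem.Int.toStr d)
          · rfl
          · exact absurd (pvContains_iff.mp hb) hdnotin
      · rcases huspec_none hU with h | h
        · exact hminmem (pvContains_iff.mp h)
        · rcases hcase with ⟨d, hdrange, hdnotin⟩ | ⟨h0notin, hn0⟩
          · rw [PySem.List.mem_pyRange_one] at hdrange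
            have hdnotc : brokens.contains (PySem.Int.toStr d) = false := by
              cases hb : brokens.contains (PySem.Int.toStr d)
              · rfl
              · exact absurd (pvContains_iff.mp hb) hdnotin
            have hdP : d ∈ (pvAllowed brokens).filter (fun x => 0 < x) :=
              List.mem_filter.mpr ⟨pvMem_allowed.mpr ⟨by omega, by omega, hdnotc⟩,
                by simp; omega⟩
            obtain ⟨hrok, hrlo, _⟩ := pvRep_ok hdP 10
            refine h (pvRep d 10) (by omega) ?_
            show pvBadChars brokens _ = false
            rw [pvBad_iff_not_ok (by omega), hrok]
            rfl
          · refine h 0 (by omega) ?_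
            show pvBadChars brokens 0 = false
            rw [pvBad_small (by omega) (by omega)]
            cases hb : brokens.contains (PySem.Int.toStr 0)
            · rfl
            · exact absurd (pvContains_iff.mp hb) h0notin
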